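-- pv_equiv track=rewrite | github.com/obspy/obspy | obspy/io/seiscomp/inventory.py | _count_complex
-- ===== SOURCE A (Python) =====
-- def _count_complex(complex_string):
--     """
--     Returns number of complex numbers in string (formatted according to
--     SeisComp3 XML schema type "ComplexArray"). Raises an Exception if string
--     seems invalid.
--     """
--     counts = set()
--     for char in '(,)':
--         counts.add(complex_string.count(char))
--     if len(counts) != 1:
--         msg = ("Invalid string for list of complex numbers:"
--                "\n'%s'") % complex_string
--         raise ValueError(msg)
--     return counts.pop()
-- ===== SOURCE B (Python) =====
-- def _count_complex(complex_string):
--     """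
--     Returns number of complex numbers in string (formatted according to
--     SeisComp3 XML schema type "ComplexArray"). Raises an Exception if string
--     seems invalid.
--     """
--     opens = commas = closes = 0
--     for ch in complex_string:
--         if ch == '(':
--             opens += 1
--         elif ch == ',':
--             commas += 1
--         elif ch == ')':
--             closes += 1
--     if opens != commas or commas != closes:
--         msg = ("Invalid string for list of complex numbers:"
--                "\n'%s'") % complex_string
--         raise ValueError(msg)
--     return opens
-- ===== Notes on version B (the rewrite author's own statement) =====
-- stated objective: alternative
-- what changed: Replaces three separate str.count scans collected into a set (testing the set's size) by one linear pass maintaining three explicit counters compared directly at the end; Pre_ excludes the strings with unequal '(' ',' ')' counts, on which both implementations raise ValueError.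
import Mathlib
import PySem

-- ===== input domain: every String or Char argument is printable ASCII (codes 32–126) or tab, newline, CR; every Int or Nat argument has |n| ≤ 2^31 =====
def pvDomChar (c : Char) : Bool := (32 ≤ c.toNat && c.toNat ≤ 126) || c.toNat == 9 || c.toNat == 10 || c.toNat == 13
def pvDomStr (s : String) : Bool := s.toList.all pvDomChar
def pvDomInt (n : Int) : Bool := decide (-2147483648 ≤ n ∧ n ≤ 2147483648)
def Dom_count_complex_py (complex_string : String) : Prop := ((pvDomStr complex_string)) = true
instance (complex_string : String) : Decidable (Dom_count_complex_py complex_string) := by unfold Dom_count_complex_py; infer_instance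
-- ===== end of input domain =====

-- B replaces A's three str.count scans + set dedup by one pass with three counters (objective: alternative).

-- ===== PORT A =====
-- A: counts = set(); for char in '(,)': counts.add(complex_string.count(char));
--    if len(counts) != 1: raise ValueError(...)  (excluded by Pre_); return counts.pop()
def count_complex_py (complex_string : String) : Int :=
  let counts : PySem.Set Nat :=
    "(,)".toList.foldl
      (fun st ch => PySem.Set.add st (PySem.Str.count complex_string (String.ofList [ch])))
      (PySem.Set.ofList [])
  if counts.length ≠ 1 then 0   -- Python raises ValueError here; excluded by Pre_
  else ((counts.headD 0 : Nat) : Int)   -- set.pop() on a singleton set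

-- ===== PORT B =====
-- B: one pass, three counters; raise (excluded by Pre_) if they disagree, else return opens
def count_complex_py_alt (complex_string : String) : Int :=
  let t : Int × Int × Int :=
    complex_string.toList.foldl
      (fun (acc : Int × Int × Int) ch =>
        if ch = '(' then (acc.1 + 1, acc.2.1, acc.2.2)
        else if ch = ',' then (acc.1, acc.2.1 + 1, acc.2.2)
        else if ch = ')' then (acc.1, acc.2.1, acc.2.2 + 1)
        else acc)
      (0, 0, 0)
  if t.1 ≠ t.2.1 ∨ t.2.1 ≠ t.2.2 then 0   -- Python raises ValueError here; excluded by Pre_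
  else t.1

-- ===== PRECONDITION & SPEC =====
-- Pre_ excludes exactly the strings whose '(' ',' ')' counts are not all equal: there A raises ValueError.
def Pre_count_complex_py (complex_string : String) : Prop :=
  complex_string.toList.count '(' = complex_string.toList.count ','
  ∧ complex_string.toList.count ',' = complex_string.toList.count ')'
instance (complex_string : String) : Decidable (Pre_count_complex_py complex_string) := by unfold Pre_count_complex_py; infer_instance

def pvWitness_count_complex_py : String := "(1,2) (3,4)"

def Spec_count_complex_py (complex_string : String) (out : Int) : Prop := out = count_complex_py_alt complex_string
instance (complex_string : String) (out : Int) : Decidable (Spec_count_complex_py complex_string out) := by unfold Spec_count_complex_py; infer_instance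

-- ===== CLAIM (what is proved, stated in full; the proofs are below) =====
def Claim_equal_count_complex_py : Prop := ∀ (complex_string : String), Dom_count_complex_py complex_string → Pre_count_complex_py complex_string → Spec_count_complex_py complex_string (count_complex_py complex_string)

-- ===== LEMMAS AND PROOFS =====

-- Python str.count with a single-character needle counts character occurrences.
theorem chars_count_go_singleton (c : Char) :
    ∀ (s : List Char) (fuel acc : Nat), s.length ≤ fuel →
      PySem.Chars.count.go [c] fuel s acc = acc + s.count c := by
  intro s
  induction s with
  | nil =>
      intro fuel acc h
      rw [PySem.Chars.count.go.eq_def]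
      cases fuel <;> simp
  | cons h t ih =>
      intro fuel acc hle
      cases fuel with
      | zero => simp at hle
      | succ fuel =>
        simp only [List.length_cons] at hle
        rw [PySem.Chars.count.go.eq_def]
        simp only [List.isPrefixOf]
        by_cases hc : c = h
        · rw [if_pos (by simp [hc])]
          simp only [List.length_cons, List.length_nil, Nat.zero_add, List.drop_one, List.tail_cons]
          rw [ih fuel (acc + 1) (by omega)]
          simp [hc]
          omega
        · rw [if_neg (by simp [hc])]
          rw [ih fuel acc (by omega)]
          have hnc : ¬ (h = c) := fun e => hc e.symm
          simp [hnc]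

theorem str_count_singleton (s : String) (c : Char) :
    PySem.Str.count s (String.ofList [c]) = s.toList.count c := by
  have h1 : PySem.Str.count s (String.ofList [c]) = PySem.Chars.count s.toList [c] := by
    simp [PySem.Str.count_eq]
  rw [h1]
  unfold PySem.Chars.count
  rw [if_neg (by simp : ¬ (([c] : List Char).isEmpty = true))]
  simpa using chars_count_go_singleton c s.toList s.toList.length 0 (le_refl _)

-- B's fold computes the three character counts.
theorem alt_fold_counts (s : List Char) :
    ∀ (a b c : Int),
      s.foldl
        (fun (acc : Int × Int × Int) ch =>
          if ch = '(' then (acc.1 + 1, acc.2.1, acc.2.2)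
          else if ch = ',' then (acc.1, acc.2.1 + 1, acc.2.2)
          else if ch = ')' then (acc.1, acc.2.1, acc.2.2 + 1)
          else acc)
        (a, b, c)
      = (a + s.count '(', b + s.count ',', c + s.count ')') := by
  induction s with
  | nil => intro a b c; simp
  | cons h t ih =>
      intro a b c
      simp only [List.foldl_cons]
      by_cases h1 : h = '('
      · rw [if_pos h1, ih]
        simp only [Prod.mk.injEq, List.count_cons, h1]
        refine ⟨by simp; omega, by simp, by simp⟩
      · rw [if_neg h1]
        by_cases h2 : h = ','
        · rw [if_pos h2, ih]
          simp only [Prod.mk.injEq, List.count_cons, h2]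
          refine ⟨by simp, by simp; omega, by simp⟩
        · rw [if_neg h2]
          by_cases h3 : h = ')'
          · rw [if_pos h3, ih]
            simp only [Prod.mk.injEq, List.count_cons, h3]
            refine ⟨by simp, by simp, by simp; omega⟩
          · rw [if_neg h3, ih]
            have n1 : ¬ (h = '(') := h1
            simp [h1, h2, h3]

-- ===== VERDICT (by name: the statement is the Claim_ definition above) =====
theorem count_complex_py_spec : Claim_equal_count_complex_py := by
  intro s _ hpre
  obtain ⟨h1, h2⟩ := hpre
  unfold Spec_count_complex_py count_complex_py count_complex_py_alt
  have hB := alt_fold_counts s.toList 0 0 0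
  simp only [hB, zero_add]
  have hlist : "(,)".toList = ['(', ',', ')'] := by decide
  simp only [hlist, List.foldl_cons, List.foldl_nil]
  have e1 : PySem.Str.count s (String.ofList ['(']) = s.toList.count '(' := str_count_singleton s '('
  have e2 : PySem.Str.count s (String.ofList [',']) = s.toList.count '(' := by
    rw [str_count_singleton s ',']; omega
  have e3 : PySem.Str.count s (String.ofList [')']) = s.toList.count '(' := by
    rw [str_count_singleton s ')']; omega
  rw [e1, e2, e3]
  have hset : PySem.Set.add (PySem.Set.add (PySem.Set.add (PySem.Set.ofList ([] : List Nat)) (s.toList.count '(')) (s.toList.count '(')) (s.toList.count '(') = [s.toList.count '('] := by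
    simp [PySem.Set.add, PySem.Set.ofList]
  rw [hset]
  have hcond : ¬ (((s.toList.count '(' : Int) ≠ (s.toList.count ',' : Int))
      ∨ ((s.toList.count ',' : Int) ≠ (s.toList.count ')' : Int))) := by
    push Not
    exact ⟨by exact_mod_cast h1, by exact_mod_cast h2⟩
  rw [if_neg (by simp), if_neg hcond]
  simp [h1]
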